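-- pv_equiv track=rewrite | github.com/hyperledger-iroha/iroha | scripts/swift_status_export.py | _skip_leading_comments
-- ===== SOURCE A (Python) =====
-- from typing import Iterable, Iterator, List, Optional, Sequence, Tuple
--
-- def _skip_leading_comments(lines: Sequence[str], idx: int) -> int:
--     while idx < len(lines):
--         stripped = lines[idx].strip()
--         if not stripped:
--             idx += 1
--             continue
--         if stripped.startswith("<!--"):
--             if stripped.endswith("-->"):
--                 idx += 1
--                 continue
--             idx += 1
--             while idx < len(lines) and "-->" not in lines[idx]:
--                 idx += 1
--             if idx < len(lines):
--                 idx += 1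
--             continue
--         break
--     return idx
-- ===== SOURCE B (Python) =====
-- def _step(line, in_comment):
--     """Return the next in_comment flag, or None to stop at this line."""
--     if in_comment:
--         return "-->" not in line
--     s = line.strip()
--     if s and not s.startswith("<!--"):
--         return None
--     return s.startswith("<!--") and not s.endswith("-->")
--
-- def _skip_leading_comments(lines, idx):
--     in_comment = False
--     while idx < len(lines):
--         nxt = _step(lines[idx], in_comment)
--         if nxt is None:
--             break
--         in_comment = nxt
--         idx += 1
--     return idx
-- ===== Notes on version B (the rewrite author's own statement) =====
-- stated objective: simpler
-- what changed: Replaced A's nested inner while-loop that scans for '-->' with a single flat loop driven by a pure per-line transition function _step(line, in_comment) that returns None (stop) or the next flag.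
import Mathlib
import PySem

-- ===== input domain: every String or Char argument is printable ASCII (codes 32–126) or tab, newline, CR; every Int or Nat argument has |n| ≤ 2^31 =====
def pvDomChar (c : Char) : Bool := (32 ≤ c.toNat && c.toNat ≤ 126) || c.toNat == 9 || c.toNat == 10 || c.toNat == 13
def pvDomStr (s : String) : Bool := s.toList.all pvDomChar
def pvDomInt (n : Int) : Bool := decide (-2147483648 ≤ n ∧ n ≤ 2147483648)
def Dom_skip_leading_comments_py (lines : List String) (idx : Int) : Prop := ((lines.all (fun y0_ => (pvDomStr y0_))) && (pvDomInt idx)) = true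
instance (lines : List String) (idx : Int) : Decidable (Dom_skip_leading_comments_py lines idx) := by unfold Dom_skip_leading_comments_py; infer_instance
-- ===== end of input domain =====

-- B replaces A's nested inner while-loop (scan for the closing '-->') with one flat
-- index loop driven by a pure per-line transition function (stop, or the next
-- in-comment flag); return value only, no mutation. Both loops advance idx by 1 each
-- iteration, so they run at most (len(lines) - idx) iterations: that count is the
-- fuel of the structural recursions.

-- ===== PORT A =====
-- A's inner loop: advance idx past lines not containing "-->".
def skipInner (lines : List String) : Nat → Int → Int
  | 0, idx => idx
  | fuel + 1, idx =>
    if idx < (lines.length : Int) then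
      match PySem.List.pyGet? lines idx with
      | none => idx        -- IndexError in Python; excluded by Pre_
      | some line =>
        if PySem.Str.isIn "-->" line then idx
        else skipInner lines fuel (idx + 1)
    else idx

-- A's outer loop, transliterated.
def skipOuter (lines : List String) : Nat → Int → Int
  | 0, idx => idx
  | fuel + 1, idx =>
    if idx < (lines.length : Int) then
      match PySem.List.pyGet? lines idx with
      | none => idx        -- IndexError in Python; excluded by Pre_
      | some line =>
        let stripped := PySem.Str.strip line
        if stripped = "" then skipOuter lines fuel (idx + 1)
        else if PySem.Str.startswith stripped "<!--" then
          if PySem.Str.endswith stripped "-->" then skipOuter lines fuel (idx + 1)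
          else
            let j := skipInner lines fuel (idx + 1)
            if j < (lines.length : Int) then skipOuter lines fuel (j + 1) else j
        else idx
    else idx

def skip_leading_comments_py (lines : List String) (idx : Int) : Int :=
  skipOuter lines ((lines.length : Int) - idx).toNat idx

-- ===== PORT B =====
-- B's per-line transition: none = stop at this line, some c = consume it, next flag c.
def stepB (line : String) (inComment : Bool) : Option Bool :=
  if inComment then some (!(PySem.Str.isIn "-->" line))
  else
    let s := PySem.Str.strip line
    if s ≠ "" && !(PySem.Str.startswith s "<!--") then none
    else some (PySem.Str.startswith s "<!--" && !(PySem.Str.endswith s "-->"))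

def altLoop (lines : List String) : Nat → Int → Bool → Int
  | 0, idx, _ => idx
  | fuel + 1, idx, c =>
    if idx < (lines.length : Int) then
      match PySem.List.pyGet? lines idx with
      | none => idx        -- IndexError in Python; excluded by Pre_
      | some line =>
        match stepB line c with
        | none => idx
        | some c' => altLoop lines fuel (idx + 1) c'
    else idx

def skip_leading_comments_py_alt (lines : List String) (idx : Int) : Int :=
  altLoop lines ((lines.length : Int) - idx).toNat idx false

-- ===== PRECONDITION & SPEC =====
-- Pre_ excludes exactly the inputs where Python A raises IndexError: idx < -len(lines).
def Pre_skip_leading_comments_py (lines : List String) (idx : Int) : Prop :=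
  -(lines.length : Int) ≤ idx
instance (lines : List String) (idx : Int) : Decidable (Pre_skip_leading_comments_py lines idx) := by
  unfold Pre_skip_leading_comments_py; infer_instance
def pvWitness_skip_leading_comments_py : List String × Int := (["<!--", "end -->", "text"], 0)

def Spec_skip_leading_comments_py (lines : List String) (idx : Int) (out : Int) : Prop := out = skip_leading_comments_py_alt lines idx
instance (lines : List String) (idx : Int) (out : Int) : Decidable (Spec_skip_leading_comments_py lines idx out) := by unfold Spec_skip_leading_comments_py; infer_instance

-- ===== CLAIM (what is proved, stated in full; the proofs are below) =====
def Claim_equal_skip_leading_comments_py : Prop := ∀ (lines : List String) (idx : Int), Dom_skip_leading_comments_py lines idx → Pre_skip_leading_comments_py lines idx → Spec_skip_leading_comments_py lines idx (skip_leading_comments_py lines idx)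

-- ===== LEMMAS AND PROOFS =====

-- Under the precondition, indexing never fails.
theorem pyGet?_some_of_pre (lines : List String) (idx : Int)
    (h1 : -(lines.length : Int) ≤ idx) (h2 : idx < lines.length) :
    ∃ s, PySem.List.pyGet? lines idx = some s := by
  rcases h : PySem.List.pyGet? lines idx with _ | s
  · rw [PySem.List.pyGet?_eq_none_iff] at h
    exact absurd ⟨h1, h2⟩ h
  · exact ⟨s, rfl⟩

theorem skipInner_past (lines : List String) (f : Nat) (k : Int)
    (h : (lines.length : Int) ≤ k) : skipInner lines f k = k := by
  cases f with
  | zero => rfl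
  | succ f => simp [skipInner, not_lt.mpr h]

theorem skipInner_ge (lines : List String) (f : Nat) (k : Int) :
    k ≤ skipInner lines f k := by
  induction f generalizing k with
  | zero => simp [skipInner]
  | succ f ih =>
    simp only [skipInner]
    split
    · split
      · omega
      · split
        · omega
        · have := ih (k + 1); omega
    · omega

theorem altLoop_past (lines : List String) (f : Nat) (k : Int) (c : Bool)
    (h : (lines.length : Int) ≤ k) : altLoop lines f k c = k := by
  cases f with
  | zero => rfl
  | succ f => simp [altLoop, not_lt.mpr h]

theorem altLoop_irrel (lines : List String) (f f' : Nat) (k : Int) (c : Bool)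
    (hf : (lines.length : Int) - k ≤ f) (hf' : (lines.length : Int) - k ≤ f') :
    altLoop lines f k c = altLoop lines f' k c := by
  induction f generalizing f' k c with
  | zero =>
    rw [altLoop_past lines 0 k c (by omega), altLoop_past lines f' k c (by omega)]
  | succ f ih =>
    by_cases hk : k < (lines.length : Int)
    · cases f' with
      | zero => omega
      | succ f' =>
        simp only [altLoop, hk, if_true]
        rcases PySem.List.pyGet? lines k with _ | s
        · rfl
        · simp only
          rcases stepB s c with _ | c'
          · rfl
          · exact ih f' (k + 1) c' (by omega) (by omega)
    · rw [altLoop_past lines _ k c (by omega), altLoop_past lines f' k c (by omega)]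

-- B's in-comment state computes A's inner loop followed by the post-loop step.
theorem altLoop_true_eq (lines : List String) (f : Nat) (k : Int)
    (hf : (lines.length : Int) - k ≤ f) (hk : -(lines.length : Int) ≤ k) :
    altLoop lines f k true =
      (let j := skipInner lines f k;
       if j < (lines.length : Int) then altLoop lines f (j + 1) false else j) := by
  induction f generalizing k with
  | zero =>
    rw [altLoop_past lines 0 k true (by omega), skipInner_past lines 0 k (by omega)]
    simp only
    rw [if_neg (by omega)]
  | succ f ih =>
    by_cases hlt : k < (lines.length : Int)
    · obtain ⟨s, hs⟩ := pyGet?_some_of_pre lines k hk hlt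
      simp only [altLoop, skipInner, hlt, if_true, hs, stepB]
      by_cases hin : PySem.Str.isIn "-->" s = true
      · simp only [hin, if_true, Bool.not_true, if_pos hlt]
        exact altLoop_irrel lines f (f + 1) (k + 1) false (by omega) (by omega)
      · simp only [hin, if_false, Bool.false_eq_true, Bool.not_false]
        rw [ih (k + 1) (by omega) (by omega)]
        simp only
        have hge := skipInner_ge lines f (k + 1)
        by_cases hj : skipInner lines f (k + 1) < (lines.length : Int)
        · rw [if_pos hj, if_pos hj]
          exact altLoop_irrel lines f (f + 1) _ false (by omega) (by omega)
        · rw [if_neg hj, if_neg hj]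
    · rw [altLoop_past lines _ k true (by omega), skipInner_past lines _ k (by omega)]
      simp only
      rw [if_neg (by omega)]

theorem main_eq (lines : List String) (f : Nat) (k : Int)
    (hf : (lines.length : Int) - k ≤ f) (hk : -(lines.length : Int) ≤ k) :
    skipOuter lines f k = altLoop lines f k false := by
  induction f generalizing k with
  | zero => rfl
  | succ f ih =>
    by_cases hlt : k < (lines.length : Int)
    · obtain ⟨s, hs⟩ := pyGet?_some_of_pre lines k hk hlt
      simp only [skipOuter, altLoop, hlt, if_true, hs, stepB, Bool.false_eq_true, if_false]
      by_cases hempty : PySem.Str.strip s = ""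
      · simp only [hempty, if_true, ne_eq, not_true_eq_false, decide_false, Bool.false_and,
          Bool.false_eq_true, if_false]
        have : PySem.Str.startswith "" "<!--" = false := by decide
        simp only [this, Bool.false_and]
        exact ih (k + 1) (by omega) (by omega)
      · rw [if_neg hempty]
        by_cases hstart : PySem.Str.startswith (PySem.Str.strip s) "<!--" = true
        · rw [if_pos hstart]
          simp only [ne_eq, hempty, not_false_eq_true, decide_true, hstart, Bool.not_true,
            Bool.true_and, Bool.and_false, Bool.false_eq_true, if_false]
          by_cases hend : PySem.Str.endswith (PySem.Str.strip s) "-->" = true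
          · rw [if_pos hend]
            simp only [hend, Bool.not_true]
            exact ih (k + 1) (by omega) (by omega)
          · rw [if_neg hend]
            simp only [Bool.not_eq_true] at hend
            simp only [hend, Bool.not_false]
            rw [altLoop_true_eq lines f (k + 1) (by omega) (by omega)]
            simp only
            have hge := skipInner_ge lines f (k + 1)
            by_cases hj : skipInner lines f (k + 1) < (lines.length : Int)
            · rw [if_pos hj, if_pos hj]
              exact ih _ (by omega) (by omega)
            · rw [if_neg hj, if_neg hj]
        · rw [if_neg hstart]
          simp only [Bool.not_eq_true] at hstart
          simp only [ne_eq, hempty, not_false_eq_true, decide_true, hstart, Bool.not_false,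
            Bool.true_and, if_true]
    · simp [skipOuter, altLoop, not_lt.mpr (not_lt.mp hlt)]

-- ===== VERDICT (by name: the statement is the Claim_ definition above) =====
theorem skip_leading_comments_py_spec : Claim_equal_skip_leading_comments_py := by
  intro lines idx _ hpre
  unfold Spec_skip_leading_comments_py skip_leading_comments_py skip_leading_comments_py_alt
  exact main_eq lines _ idx (by omega) hpre
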